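-- pv_equiv track=rewrite | github.com/Princever/DM_Prefixspan | util.py | genStage
-- ===== SOURCE A (Python) =====
-- def getItems(seqs):
--     items = []
--     for custom in seqs:
--         for basket in custom:
--             for item in basket:
--                 if [item] not in items:
--                     items.append([item])
--
--     items.sort()
--     return items
--
-- def genStage(maxSeqs):
--     allitem = getItems(maxSeqs)
--     allitems = []
--     for each in allitem:
--         allitems += each
--     items = {}
--     for each in allitems:
--         items.setdefault(each,0)
--     return items
-- ===== SOURCE B (Python) =====
-- def genStage(maxSeqs):
--     flat = sorted(item for custom in maxSeqs for basket in custom for item in basket)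
--     out = {}
--     prev = None
--     for item in flat:
--         if prev is None or item != prev:
--             out[item] = 0
--             prev = item
--     return out
-- ===== Notes on version B (the rewrite author's own statement) =====
-- stated objective: alternative
-- what changed: Sort-then-scan instead of dedup-then-sort: B sorts the flattened item stream with duplicates and builds the dict in one adjacent-duplicate-skipping pass, removing A's quadratic list-membership dedup, the singleton-list representation, the flatten pass and the setdefault loop.
import Mathlib
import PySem

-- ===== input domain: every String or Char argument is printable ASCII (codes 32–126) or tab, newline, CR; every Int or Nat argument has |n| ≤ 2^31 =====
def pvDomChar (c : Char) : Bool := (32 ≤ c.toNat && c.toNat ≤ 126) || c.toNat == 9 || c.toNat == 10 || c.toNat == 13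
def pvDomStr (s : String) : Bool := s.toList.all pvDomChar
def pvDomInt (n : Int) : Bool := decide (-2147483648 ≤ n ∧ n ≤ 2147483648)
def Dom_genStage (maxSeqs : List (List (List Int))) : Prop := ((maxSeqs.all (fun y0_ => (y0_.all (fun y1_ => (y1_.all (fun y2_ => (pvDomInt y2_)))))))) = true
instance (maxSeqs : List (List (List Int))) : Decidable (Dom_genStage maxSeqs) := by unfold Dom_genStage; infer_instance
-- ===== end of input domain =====

-- B uses sort-then-scan instead of dedup-then-sort: it sorts the flattened item stream
-- (with duplicates) and builds the dict in one pass that skips adjacent duplicates,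
-- replacing A's quadratic list-membership dedup, singleton-list representation,
-- flatten pass and setdefault loop.

-- ===== PORT A =====
-- getItems: dedup the items as singleton lists via list membership, then sort
def getItems (seqs : List (List (List Int))) : List (List Int) :=
  let items : List (List Int) :=
    seqs.foldl (fun items custom =>
      custom.foldl (fun items basket =>
        basket.foldl (fun items item =>
          if [item] ∈ items then items else items ++ [[item]]) items) items) []
  PySem.List.sorted items id

def genStage (maxSeqs : List (List (List Int))) : List (Int × Int) :=
  let allitem := getItems maxSeqs
  let allitems := allitem.foldl (fun acc each => acc ++ each) []
  let d : PySem.Dict Int Int :=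
    allitems.foldl (fun d each => d.setdefault each 0) ⟨[]⟩
  d.items

-- ===== PORT B =====
def genStage_alt (maxSeqs : List (List (List Int))) : List (Int × Int) :=
  let flat := PySem.List.sorted
    (maxSeqs.flatMap (fun custom => custom.flatMap (fun basket => basket))) id
  let st := flat.foldl
    (fun (st : PySem.Dict Int Int × Option Int) item =>
      if st.2 = none ∨ some item ≠ st.2 then (st.1.insert item 0, some item) else st)
    (⟨[]⟩, none)
  st.1.items

-- ===== PRECONDITION & SPEC =====
def Spec_genStage (maxSeqs : List (List (List Int))) (out : List (Int × Int)) : Prop := out = genStage_alt maxSeqs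
instance (maxSeqs : List (List (List Int))) (out : List (Int × Int)) : Decidable (Spec_genStage maxSeqs out) := by unfold Spec_genStage; infer_instance

-- ===== CLAIM (what is proved, stated in full; the proofs are below) =====
def Claim_equal_genStage : Prop := ∀ (maxSeqs : List (List (List Int))), Dom_genStage maxSeqs → Spec_genStage maxSeqs (genStage maxSeqs)

-- ===== LEMMAS AND PROOFS =====

-- ---- A-side: A returns the sorted distinct items, each paired with 0 ----

-- A's dedup loop is Set.ofList in the singleton-list representation
theorem foldl_single_add (xs : List Int) (L : List Int) :
    xs.foldl (fun items item =>
        if [item] ∈ items then items else items ++ [[item]]) (L.map fun i => [i])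
    = (xs.foldl PySem.Set.add L).map fun i => [i] := by
  induction xs generalizing L with
  | nil => rfl
  | cons x xs ih =>
    have hmem : ([x] ∈ L.map fun i => [i]) ↔ x ∈ L := by simp
    have hc : (PySem.Set.contains L x) = decide (x ∈ L) := by simp [PySem.Set.contains]
    by_cases h : x ∈ L
    · simp only [List.foldl_cons, if_pos (hmem.mpr h), PySem.Set.add, hc, h,
        decide_true, if_true]
      exact ih L
    · simp only [List.foldl_cons, if_neg (fun hx => h (hmem.mp hx)), PySem.Set.add, hc, h,
        decide_false, Bool.false_eq_true, if_false]
      have : (L.map fun i => ([i] : List Int)) ++ [[x]] = (L ++ [x]).map fun i => [i] := by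
        simp
      rw [this, ih (L ++ [x])]

theorem singleton_lt_iff (a b : Int) : (([a] : List Int) < [b]) ↔ a < b := by
  constructor
  · intro h; rcases h with _ | h | h
    · exact h
    · cases h
  · intro h; exact List.Lex.rel h

-- sorting the singleton lists = sorting the items, wrapped
theorem sorted_map_single (L : List Int) (hnd : L.Nodup) :
    PySem.List.sorted (L.map fun i => [i]) id
      = (PySem.List.sorted L id).map fun i => [i] := by
  have hperm := PySem.List.sorted_perm L id false
  have hpm : ((PySem.List.sorted L id).map fun i => ([i] : List Int)).Perm
      (L.map fun i => [i]) := hperm.map _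
  have hlt2 : List.Pairwise (fun a b : List Int => id a < id b)
      ((PySem.List.sorted L id).map fun i => [i]) := by
    have hle := PySem.List.sorted_pairwise L id
    have hnd' : (PySem.List.sorted L id).Nodup := hperm.nodup_iff.mpr hnd
    have hlt : List.Pairwise (fun a b : Int => a < b) (PySem.List.sorted L id) := by
      have := hle.and hnd'
      exact this.imp (fun {a b} h => lt_of_le_of_ne h.1 h.2)
    refine List.Pairwise.map _ ?_ hlt
    intro a b h
    exact (singleton_lt_iff a b).mpr h
  convert PySem.List.sorted_eq_of_perm_of_pairwise_lt
    (L.map fun i => ([i] : List Int)) ((PySem.List.sorted L id).map fun i => [i]) id hpm hlt2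
      using 2

-- the setdefault loop over a nodup list of fresh keys just appends (·, 0) pairs
theorem setdefault_loop (ys : List Int) : ∀ (P : List Int), ys.Nodup →
    (∀ e ∈ ys, e ∉ P) →
    (ys.foldl (fun d each => PySem.Dict.setdefault d each 0)
        (⟨P.map fun i => (i, 0)⟩ : PySem.Dict Int Int)).items
      = (P ++ ys).map fun i => (i, 0) := by
  induction ys with
  | nil => intro P _ _; simp
  | cons y ys ih =>
    intro P hnd hfresh
    have hy : y ∉ P := hfresh y (by simp)
    have hc : PySem.Dict.contains (⟨P.map fun i => (i, 0)⟩ : PySem.Dict Int Int) y = false := by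
      simp [PySem.Dict.contains]
      intro a ha hab
      exact hy (hab ▸ ha)
    have hstep : PySem.Dict.setdefault (⟨P.map fun i => (i, 0)⟩ : PySem.Dict Int Int) y 0
        = ⟨(P ++ [y]).map fun i => (i, 0)⟩ := by
      simp [PySem.Dict.setdefault, hc]
    rw [List.foldl_cons, hstep,
      ih (P ++ [y]) hnd.of_cons
        (fun e he => by
          intro hmem
          rcases List.mem_append.mp hmem with h | h
          · exact hfresh e (by simp [he]) h
          · simp at h
            exact (List.nodup_cons.mp hnd).1 (h ▸ he))]
    simp

theorem flatten_map_single (L : List Int) : (L.map fun i => [i]).flatten = L := by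
  induction L with
  | nil => rfl
  | cons a l ih => simp [ih]

-- A's value: the sorted distinct items of the flattened input, paired with 0
theorem genStage_eq_sorted (maxSeqs : List (List (List Int))) :
    genStage maxSeqs
      = (PySem.List.sorted
          (PySem.Set.ofList (maxSeqs.flatMap (fun custom => custom.flatMap (fun basket => basket)))) id).map
          (fun i => (i, 0)) := by
  unfold genStage getItems
  dsimp only
  set xs := maxSeqs.flatMap (fun custom => custom.flatMap (fun basket => basket)) with hxs
  have hflat :
      maxSeqs.foldl (fun items custom =>
        custom.foldl (fun items basket =>
          basket.foldl (fun items item =>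
            if [item] ∈ items then items else items ++ [[item]]) items) items)
        ([] : List (List Int))
      = xs.foldl (fun items item =>
          if [item] ∈ items then items else items ++ [[item]]) [] := by
    rw [hxs]; simp only [List.foldl_flatMap]
  rw [hflat]
  have h1 := foldl_single_add xs []
  simp only [List.map_nil] at h1
  rw [h1]
  have hnd : (xs.foldl PySem.Set.add [] : List Int).Nodup := PySem.Set.nodup_ofList xs
  rw [sorted_map_single _ hnd]
  have hjoin : ((PySem.List.sorted (xs.foldl PySem.Set.add []) id).map fun i => [i]).foldl
      (fun acc each => acc ++ each) [] = PySem.List.sorted (xs.foldl PySem.Set.add []) id := by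
    rw [PySem.List.foldl_append_eq_flatMap]
    simp [flatten_map_single]
  rw [hjoin]
  have hndS : (PySem.List.sorted (xs.foldl PySem.Set.add []) id).Nodup :=
    (PySem.List.sorted_perm _ id false).nodup_iff.mpr hnd
  have hsd := setdefault_loop (PySem.List.sorted (xs.foldl PySem.Set.add []) id) [] hndS
    (by simp)
  simpa [PySem.Set.ofList, PySem.Set.empty] using hsd

-- ---- B-side: the adjacent-duplicate-skipping scan ----

-- the list of emitted keys of B's loop (proof-only model of the scan)
def scanD : Option Int → List Int → List Int
  | _, [] => []
  | p, x :: xs => if p = none ∨ some x ≠ p then x :: scanD (some x) xs else scanD p xs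

theorem notCond (y : Int) : ¬((some y : Option Int) = none ∨ some y ≠ some y) := by
  rintro (h | h)
  · cases h
  · exact h rfl

theorem mem_scanD (l : List Int) : ∀ (p : Option Int),
    l.Pairwise (· ≤ ·) → (∀ x ∈ l, ∀ v, p = some v → v ≤ x) →
    ∀ x, x ∈ scanD p l ↔ x ∈ l ∧ (∀ v, p = some v → x ≠ v) := by
  induction l with
  | nil => intro p _ _ x; simp [scanD]
  | cons y ys ih =>
    intro p hpw hp x
    have hpwt := (List.pairwise_cons.mp hpw).2
    have hyle : ∀ z ∈ ys, y ≤ z := (List.pairwise_cons.mp hpw).1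
    by_cases hc : p = none ∨ some y ≠ p
    · have hrec := ih (some y) hpwt (fun z hz v hv => by cases hv; exact hyle z hz) x
      simp only [scanD, if_pos hc, List.mem_cons, hrec]
      constructor
      · rintro (rfl | ⟨hx, hne⟩)
        · refine ⟨Or.inl rfl, ?_⟩
          intro v hv
          rcases hc with hc | hc
          · simp [hc] at hv
          · intro rfl'; exact hc (by rw [hv, rfl'])
        · refine ⟨Or.inr hx, ?_⟩
          intro v hv rfl'
          rcases hc with hc | hc
          · simp [hc] at hv
          · have hvy : v ≤ y := hp y (List.mem_cons.mpr (Or.inl rfl)) v hv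
            have hvny : v ≠ y := fun h => hc (by rw [hv, h])
            have : y ≤ x := hyle x hx
            omega
      · rintro ⟨(rfl | hx), hne⟩
        · exact Or.inl rfl
        · by_cases hxy : x = y
          · exact Or.inl hxy
          · exact Or.inr ⟨hx, fun v hv => by cases hv; exact hxy⟩
    · push_neg at hc
      obtain ⟨hpn, hpy⟩ := hc
      have hpy' : p = some y := hpy.symm
      subst hpy'
      have hrec := ih (some y) hpwt (fun z hz v hv => by cases hv; exact hyle z hz) x
      simp only [scanD, if_neg (notCond y)]
      rw [hrec]
      constructor
      · rintro ⟨hx, hne⟩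
        exact ⟨List.mem_cons.mpr (Or.inr hx), hne⟩
      · rintro ⟨hx, hne⟩
        rcases List.mem_cons.mp hx with rfl | hx'
        · exact absurd rfl (hne x rfl)
        · exact ⟨hx', hne⟩

theorem pairwise_scanD (l : List Int) : ∀ (p : Option Int),
    l.Pairwise (· ≤ ·) → (∀ x ∈ l, ∀ v, p = some v → v ≤ x) →
    (scanD p l).Pairwise (· < ·) := by
  induction l with
  | nil => intro p _ _; simp [scanD]
  | cons y ys ih =>
    intro p hpw hp
    have hpwt := (List.pairwise_cons.mp hpw).2
    have hyle : ∀ z ∈ ys, y ≤ z := (List.pairwise_cons.mp hpw).1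
    have hylb : ∀ z ∈ ys, ∀ v, (some y : Option Int) = some v → v ≤ z :=
      fun z hz v hv => by cases hv; exact hyle z hz
    by_cases hc : p = none ∨ some y ≠ p
    · simp only [scanD, if_pos hc]
      refine List.pairwise_cons.mpr ⟨?_, ih (some y) hpwt hylb⟩
      intro z hz
      have := (mem_scanD ys (some y) hpwt hylb z).mp hz
      have hzy : z ≠ y := this.2 y rfl
      have : y ≤ z := hyle z this.1
      omega
    · push_neg at hc
      obtain ⟨hpn, hpy⟩ := hc
      have hpy' : p = some y := hpy.symm
      subst hpy'
      simp only [scanD, if_neg (notCond y)]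
      exact ih (some y) hpwt hylb

-- B's dict loop appends exactly the scanned keys, paired with 0
theorem foldl_scanD (l : List Int) : ∀ (p : Option Int) (d : PySem.Dict Int Int),
    l.Pairwise (· ≤ ·) →
    (∀ x ∈ l, ∀ v, p = some v → v ≤ x) →
    (∀ k ∈ d.keys, ∀ v, p = some v → k ≤ v) →
    (p = none → d.keys = []) →
    (l.foldl
      (fun (st : PySem.Dict Int Int × Option Int) item =>
        if st.2 = none ∨ some item ≠ st.2 then (st.1.insert item 0, some item) else st)
      (d, p)).1.items
      = d.items ++ (scanD p l).map (fun i => (i, 0)) := by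
  induction l with
  | nil => intro p d _ _ _ _; simp [scanD]
  | cons y ys ih =>
    intro p d hpw hp hK hN
    have hpwt := (List.pairwise_cons.mp hpw).2
    have hyle : ∀ z ∈ ys, y ≤ z := (List.pairwise_cons.mp hpw).1
    by_cases hc : p = none ∨ some y ≠ p
    · -- emit: y is a fresh key
      have hfresh : d.contains y = false := by
        rw [PySem.Dict.contains_eq_decide_mem_keys]
        simp only [decide_eq_false_iff_not]
        intro hy
        rcases hc with hc | hc
        · rw [hN hc] at hy; simp at hy
        · cases p with
          | none => rw [hN rfl] at hy; simp at hy
          | some v =>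
            have hvy : v ≤ y := hp y (by simp) v rfl
            have hvny : y ≠ v := fun h => hc (by rw [h])
            have hk : y ≤ v := hK y hy v rfl
            omega
      have hins : (d.insert y 0).items = d.items ++ [(y, 0)] :=
        PySem.Dict.items_insert_of_not_contains d 0 hfresh
      have hinsk : (d.insert y 0).keys = d.keys ++ [y] :=
        PySem.Dict.keys_insert_of_not_contains d 0 hfresh
      simp only [List.foldl_cons, if_pos hc]
      rw [ih (some y) (d.insert y 0) hpwt
          (fun z hz v hv => by cases hv; exact hyle z hz)
          (fun k hk v hv => by
            cases hv
            rw [hinsk] at hk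
            rcases List.mem_append.mp hk with h | h
            · rcases hc with hc | hc
              · rw [hN hc] at h; simp at h
              · cases p with
                | none => rw [hN rfl] at h; simp at h
                | some w =>
                  have : k ≤ w := hK k h w rfl
                  have : w ≤ y := hp y (by simp) w rfl
                  omega
            · simp at h; omega)
          (by intro h; cases h)]
      rw [hins]
      simp [scanD, if_pos hc]
    · push_neg at hc
      obtain ⟨hpn, hpy⟩ := hc
      have hpy' : p = some y := hpy.symm
      subst hpy'
      have hcond : ¬((some y : Option Int) = none ∨ some y ≠ some y) := notCond y
      simp only [List.foldl_cons, if_neg hcond]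
      rw [ih (some y) d hpwt
          (fun z hz v hv => by cases hv; exact hyle z hz) hK (by intro h; cases h)]
      simp [scanD]

-- the scan of the sorted stream IS the sorted distinct list
theorem scanD_sorted_eq (xs : List Int) :
    scanD none (PySem.List.sorted xs id) = PySem.List.sorted (PySem.Set.ofList xs) id := by
  set s := PySem.List.sorted xs id with hs
  have hpw : s.Pairwise (· ≤ ·) := by
    have := PySem.List.sorted_pairwise xs id
    exact this.imp (fun {a b} h => h)
  have hpN : ∀ x ∈ s, ∀ v, (none : Option Int) = some v → v ≤ x := by
    intro x _ v hv; cases hv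
  have hmem : ∀ x, x ∈ scanD none s ↔ x ∈ xs := by
    intro x
    rw [mem_scanD s none hpw hpN x]
    constructor
    · rintro ⟨hx, _⟩
      exact (PySem.List.sorted_perm xs id false).mem_iff.mp hx
    · intro hx
      exact ⟨(PySem.List.sorted_perm xs id false).mem_iff.mpr hx, fun v hv => by cases hv⟩
  have hlt : (scanD none s).Pairwise (· < ·) := pairwise_scanD s none hpw hpN
  have hnd : (scanD none s).Nodup := hlt.imp (fun {a b} h => by omega)
  have hperm : (scanD none s).Perm (PySem.Set.ofList xs) := by
    rw [List.perm_ext_iff_of_nodup hnd (PySem.Set.nodup_ofList xs)]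
    intro a
    rw [hmem a, PySem.Set.mem_ofList]
  exact (PySem.List.sorted_eq_of_perm_of_pairwise_lt (PySem.Set.ofList xs)
    (scanD none s) id hperm (hlt.imp (fun {a b} h => h))).symm

theorem genStage_eq (maxSeqs : List (List (List Int))) :
    genStage maxSeqs = genStage_alt maxSeqs := by
  rw [genStage_eq_sorted]
  unfold genStage_alt
  dsimp only
  set xs := maxSeqs.flatMap (fun custom => custom.flatMap (fun basket => basket)) with hxs
  have hpw : (PySem.List.sorted xs id).Pairwise (· ≤ ·) := by
    have := PySem.List.sorted_pairwise xs id
    exact this.imp (fun {a b} h => h)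
  rw [foldl_scanD (PySem.List.sorted xs id) none ⟨[]⟩ hpw
      (fun x _ v hv => by cases hv)
      (fun k hk v hv => by simp [PySem.Dict.keys] at hk)
      (fun _ => by simp [PySem.Dict.keys])]
  rw [scanD_sorted_eq]
  simp

-- ===== VERDICT (by name: the statement is the Claim_ definition above) =====
theorem genStage_spec : Claim_equal_genStage := by
  intro maxSeqs _
  unfold Spec_genStage
  exact genStage_eq maxSeqs
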